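-- pv_equiv track=rewrite | github.com/AlexBro98LoVero/Dispense | Giochi/4_2_trovareParametri.py | lcg_bruteforce
-- ===== SOURCE A (Python) =====
-- def lcg_bruteforce(x0, x1, x2, x3, max_m=100):
--     results = []
--
--     for m in range(2, max_m + 1):
--         for a in range(m):
--             for c in range(m):
--                 if ((a*x0 + c) % m == x1 % m and
--                     (a*x1 + c) % m == x2 % m and
--                     (a*x2 + c) % m == x3 % m):
--                     results.append((m, a, c))
--
--     return results
-- ===== SOURCE B (Python) =====
-- def lcg_bruteforce(x0, x1, x2, x3, max_m=100):
--     # For each modulus m, build every candidate (m, a, c) with c the unique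
--     # solution of the first congruence (c = (x1 - a*x0) % m), keep those that
--     # pass the remaining two congruences, and flatten over all m.
--     def hits(m):
--         cands = [(m, a, (x1 - a * x0) % m) for a in range(m)]
--         return [t for t in cands
--                 if (t[1] * x1 + t[2]) % m == x2 % m
--                 and (t[1] * x2 + t[2]) % m == x3 % m]
--     return [t for m in range(2, max_m + 1) for t in hits(m)]
-- ===== Notes on version B (the rewrite author's own statement) =====
-- stated objective: faster
-- what changed: B removes A's innermost c-loop by solving the first congruence directly (c = (x1 - a*x0) % m is the unique c in range(m)), and replaces A's triple accumulator loop by a per-m candidate build (map) + verification (filter) flattened over m.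
import Mathlib
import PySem

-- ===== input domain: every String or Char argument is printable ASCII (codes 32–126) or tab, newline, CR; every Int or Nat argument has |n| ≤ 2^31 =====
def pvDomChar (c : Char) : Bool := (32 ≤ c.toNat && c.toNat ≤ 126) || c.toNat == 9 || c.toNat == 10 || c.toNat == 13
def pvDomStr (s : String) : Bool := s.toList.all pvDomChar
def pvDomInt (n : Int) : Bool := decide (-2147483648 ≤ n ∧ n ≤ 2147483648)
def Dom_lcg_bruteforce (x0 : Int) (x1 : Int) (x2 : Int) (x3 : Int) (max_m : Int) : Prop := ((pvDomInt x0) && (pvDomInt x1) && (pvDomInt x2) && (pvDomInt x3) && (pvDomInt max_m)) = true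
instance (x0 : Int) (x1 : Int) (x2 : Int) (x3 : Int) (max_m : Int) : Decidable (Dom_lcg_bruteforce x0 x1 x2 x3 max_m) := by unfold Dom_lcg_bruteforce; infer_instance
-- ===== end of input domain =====

-- B solves the first congruence for c directly (no innermost loop) and builds the result
-- as map+filter candidates per modulus, flattened over m (objective: faster).

-- ===== PORT A =====
def lcg_bruteforce (x0 : Int) (x1 : Int) (x2 : Int) (x3 : Int) (max_m : Int) : List (Int × Int × Int) :=
  (PySem.List.pyRange 2 (max_m + 1) 1).foldl (fun results m =>
    (PySem.List.pyRange 0 m 1).foldl (fun results a =>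
      (PySem.List.pyRange 0 m 1).foldl (fun results c =>
        if PySem.Int.mod (a * x0 + c) m = PySem.Int.mod x1 m ∧
           PySem.Int.mod (a * x1 + c) m = PySem.Int.mod x2 m ∧
           PySem.Int.mod (a * x2 + c) m = PySem.Int.mod x3 m then
          results ++ [(m, a, c)]
        else results) results) results) []

-- ===== PORT B =====
-- candidates for one modulus m, then verification of the two remaining congruences
def pvHits (x0 : Int) (x1 : Int) (x2 : Int) (x3 : Int) (m : Int) : List (Int × Int × Int) :=
  ((PySem.List.pyRange 0 m 1).map
      (fun a => (m, a, PySem.Int.mod (x1 - a * x0) m))).filter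
    (fun t => decide (PySem.Int.mod (t.2.1 * x1 + t.2.2) m = PySem.Int.mod x2 m ∧
                      PySem.Int.mod (t.2.1 * x2 + t.2.2) m = PySem.Int.mod x3 m))

def lcg_bruteforce_alt (x0 : Int) (x1 : Int) (x2 : Int) (x3 : Int) (max_m : Int) : List (Int × Int × Int) :=
  (PySem.List.pyRange 2 (max_m + 1) 1).flatMap (pvHits x0 x1 x2 x3)

-- ===== PRECONDITION & SPEC =====
def Spec_lcg_bruteforce (x0 : Int) (x1 : Int) (x2 : Int) (x3 : Int) (max_m : Int) (out : List (Int × Int × Int)) : Prop := out = lcg_bruteforce_alt x0 x1 x2 x3 max_m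
instance (x0 : Int) (x1 : Int) (x2 : Int) (x3 : Int) (max_m : Int) (out : List (Int × Int × Int)) : Decidable (Spec_lcg_bruteforce x0 x1 x2 x3 max_m out) := by unfold Spec_lcg_bruteforce; infer_instance

-- ===== CLAIM (what is proved, stated in full; the proofs are below) =====
def Claim_equal_lcg_bruteforce : Prop := ∀ (x0 : Int) (x1 : Int) (x2 : Int) (x3 : Int) (max_m : Int), Dom_lcg_bruteforce x0 x1 x2 x3 max_m → Spec_lcg_bruteforce x0 x1 x2 x3 max_m (lcg_bruteforce x0 x1 x2 x3 max_m)

-- ===== LEMMAS AND PROOFS =====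

-- On a duplicate-free list containing c0, filtering for equality with c0 yields [c0].
theorem pv_filter_unique {l : List Int} (hnd : l.Nodup) {c0 : Int} (hmem : c0 ∈ l) :
    l.filter (fun c => decide (c = c0)) = [c0] := by
  induction l with
  | nil => cases hmem
  | cons x t ih =>
    rcases List.nodup_cons.mp hnd with ⟨hx, hndt⟩
    by_cases hxc : x = c0
    · subst hxc
      simp only [List.filter_cons, decide_eq_true_eq]
      have : t.filter (fun c => decide (c = x)) = [] := by
        refine List.filter_eq_nil_iff.mpr ?_
        intro c hc
        simp only [decide_eq_true_eq]
        intro h; exact hx (h ▸ hc)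
      simp [this]
    · have hmem' : c0 ∈ t := by
        rcases List.mem_cons.mp hmem with h | h
        · exact absurd h.symm hxc
        · exact h
      simp only [List.filter_cons, decide_eq_true_eq, if_neg hxc]
      exact ih hndt hmem'

-- The first congruence, for 0 ≤ c < m, pins c to (x1 - a*x0) % m.
theorem pv_first_cong (x0 x1 a c m : Int) (hm : 0 < m) (hc0 : 0 ≤ c) (hcm : c < m) :
    (PySem.Int.mod (a * x0 + c) m = PySem.Int.mod x1 m) ↔ c = PySem.Int.mod (x1 - a * x0) m := by
  simp only [PySem.Int.mod_eq_emod_of_pos hm]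
  constructor
  · intro h
    have hdvd : m ∣ (a * x0 + c - x1) :=
      Int.dvd_of_emod_eq_zero (Int.emod_emod_of_dvd _ (dvd_refl m) ▸
        (Int.emod_eq_emod_iff_emod_sub_eq_zero.mp h))
    have hdvd' : m ∣ ((x1 - a * x0) - c) := by
      have := hdvd.neg_right
      have heq : -(a * x0 + c - x1) = (x1 - a * x0) - c := by ring
      rwa [heq] at this
    have : (x1 - a * x0) % m = c % m :=
      Int.emod_eq_emod_iff_emod_sub_eq_zero.mpr (Int.emod_eq_zero_of_dvd hdvd')
    rw [Int.emod_eq_of_lt hc0 hcm] at this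
    exact this.symm
  · intro h
    subst h
    have : (a * x0 + (x1 - a * x0) % m) % m = (a * x0 + (x1 - a * x0)) % m := by
      rw [Int.add_emod, Int.emod_emod_of_dvd _ (dvd_refl m), ← Int.add_emod]
    rw [this]
    congr 1
    ring

-- Collapse A's innermost c-loop to the directly solved c.
theorem pv_inner (x0 x1 x2 x3 a m : Int) (hm : 0 < m) (acc : List (Int × Int × Int)) :
    (PySem.List.pyRange 0 m 1).foldl (fun results c =>
        if PySem.Int.mod (a * x0 + c) m = PySem.Int.mod x1 m ∧
           PySem.Int.mod (a * x1 + c) m = PySem.Int.mod x2 m ∧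
           PySem.Int.mod (a * x2 + c) m = PySem.Int.mod x3 m then
          results ++ [(m, a, c)]
        else results) acc =
    (if PySem.Int.mod (a * x1 + PySem.Int.mod (x1 - a * x0) m) m = PySem.Int.mod x2 m ∧
        PySem.Int.mod (a * x2 + PySem.Int.mod (x1 - a * x0) m) m = PySem.Int.mod x3 m then
       acc ++ [(m, a, PySem.Int.mod (x1 - a * x0) m)]
     else acc) := by
  set c0 := PySem.Int.mod (x1 - a * x0) m with hc0def
  have hc0nn : 0 ≤ c0 := by
    rw [hc0def, PySem.Int.mod_eq_emod_of_pos hm]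
    exact Int.emod_nonneg _ (by omega)
  have hc0lt : c0 < m := by
    rw [hc0def, PySem.Int.mod_eq_emod_of_pos hm]
    exact Int.emod_lt_of_pos _ hm
  have hmem : c0 ∈ PySem.List.pyRange 0 m 1 :=
    PySem.List.mem_pyRange_one.mpr ⟨hc0nn, hc0lt⟩
  rw [PySem.List.foldl_append_ite]
  by_cases hQ : PySem.Int.mod (a * x1 + c0) m = PySem.Int.mod x2 m ∧
                PySem.Int.mod (a * x2 + c0) m = PySem.Int.mod x3 m
  · have hfc : (PySem.List.pyRange 0 m 1).filter
        (fun c => decide (PySem.Int.mod (a * x0 + c) m = PySem.Int.mod x1 m ∧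
           PySem.Int.mod (a * x1 + c) m = PySem.Int.mod x2 m ∧
           PySem.Int.mod (a * x2 + c) m = PySem.Int.mod x3 m)) =
        (PySem.List.pyRange 0 m 1).filter (fun c => decide (c = c0)) := by
      apply List.filter_congr
      intro c hc
      rcases PySem.List.mem_pyRange_one.mp hc with ⟨h0, h1⟩
      simp only [decide_eq_decide]
      constructor
      · rintro ⟨h, _, _⟩
        exact (pv_first_cong x0 x1 a c m hm h0 h1).mp h
      · rintro rfl
        exact ⟨(pv_first_cong x0 x1 a c0 m hm hc0nn hc0lt).mpr rfl, hQ.1, hQ.2⟩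
    rw [hfc, pv_filter_unique (PySem.List.nodup_pyRange_one 0 m) hmem]
    simp [hQ]
  · have hfc : (PySem.List.pyRange 0 m 1).filter
        (fun c => decide (PySem.Int.mod (a * x0 + c) m = PySem.Int.mod x1 m ∧
           PySem.Int.mod (a * x1 + c) m = PySem.Int.mod x2 m ∧
           PySem.Int.mod (a * x2 + c) m = PySem.Int.mod x3 m)) = [] := by
      refine List.filter_eq_nil_iff.mpr ?_
      intro c hc
      rcases PySem.List.mem_pyRange_one.mp hc with ⟨h0, h1⟩
      simp only [decide_eq_true_eq]
      rintro ⟨h, h2, h3⟩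
      have : c = c0 := (pv_first_cong x0 x1 a c m hm h0 h1).mp h
      subst this
      exact hQ ⟨h2, h3⟩
    rw [hfc]
    simp [hQ]

-- A's per-m double loop contributes exactly pvHits m, appended to the accumulator.
theorem pv_per_m (x0 x1 x2 x3 m : Int) (hm : 0 < m) (acc : List (Int × Int × Int)) :
    (PySem.List.pyRange 0 m 1).foldl (fun results a =>
      (PySem.List.pyRange 0 m 1).foldl (fun results c =>
        if PySem.Int.mod (a * x0 + c) m = PySem.Int.mod x1 m ∧
           PySem.Int.mod (a * x1 + c) m = PySem.Int.mod x2 m ∧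
           PySem.Int.mod (a * x2 + c) m = PySem.Int.mod x3 m then
          results ++ [(m, a, c)]
        else results) results) acc = acc ++ pvHits x0 x1 x2 x3 m := by
  have h1 : (PySem.List.pyRange 0 m 1).foldl (fun results a =>
      (PySem.List.pyRange 0 m 1).foldl (fun results c =>
        if PySem.Int.mod (a * x0 + c) m = PySem.Int.mod x1 m ∧
           PySem.Int.mod (a * x1 + c) m = PySem.Int.mod x2 m ∧
           PySem.Int.mod (a * x2 + c) m = PySem.Int.mod x3 m then
          results ++ [(m, a, c)]
        else results) results) acc =
      (PySem.List.pyRange 0 m 1).foldl (fun results a =>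
        if PySem.Int.mod (a * x1 + PySem.Int.mod (x1 - a * x0) m) m = PySem.Int.mod x2 m ∧
           PySem.Int.mod (a * x2 + PySem.Int.mod (x1 - a * x0) m) m = PySem.Int.mod x3 m then
          results ++ [(m, a, PySem.Int.mod (x1 - a * x0) m)]
        else results) acc := by
    apply PySem.List.foldl_congr_mem
    intro acc' a _
    exact pv_inner x0 x1 x2 x3 a m hm acc'
  rw [h1, PySem.List.foldl_append_ite]
  -- turn B's map-then-filter into A's filter-then-map
  unfold pvHits
  rw [List.filter_map]
  rfl

-- ===== VERDICT (by name: the statement is the Claim_ definition above) =====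
theorem lcg_bruteforce_spec : Claim_equal_lcg_bruteforce := by
  intro x0 x1 x2 x3 max_m _
  unfold Spec_lcg_bruteforce lcg_bruteforce lcg_bruteforce_alt
  have h : (PySem.List.pyRange 2 (max_m + 1) 1).foldl (fun results m =>
      (PySem.List.pyRange 0 m 1).foldl (fun results a =>
        (PySem.List.pyRange 0 m 1).foldl (fun results c =>
          if PySem.Int.mod (a * x0 + c) m = PySem.Int.mod x1 m ∧
             PySem.Int.mod (a * x1 + c) m = PySem.Int.mod x2 m ∧
             PySem.Int.mod (a * x2 + c) m = PySem.Int.mod x3 m then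
            results ++ [(m, a, c)]
          else results) results) results) [] =
      (PySem.List.pyRange 2 (max_m + 1) 1).foldl
        (fun results m => results ++ pvHits x0 x1 x2 x3 m) [] := by
    apply PySem.List.foldl_congr_mem
    intro acc m hm
    have hm2 : 2 ≤ m := (PySem.List.mem_pyRange_one.mp hm).1
    exact pv_per_m x0 x1 x2 x3 m (by omega) acc
  rw [h, PySem.List.foldl_append_eq_flatMap]
  rfl
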